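-- pv_equiv track=rewrite | github.com/AutonomosCdM/vigia | vigia_detect/agents/adk/protocol.py | _extract_primary_recommendations
-- ===== SOURCE A (Python) =====
-- from typing import Dict, Any, List, Optional, Tuple
--
-- def _extract_primary_recommendations(steps: List[Dict[str, Any]]) -> List[str]:
--     """Extract primary recommendations from protocol steps."""
--
--     # Group similar actions
--     action_groups = {}
--     for step in steps:
--         action = step.get("action", "").lower()
--         if "assessment" in action:
--             action_groups.setdefault("assessment", []).append(step)
--         elif "position" in action or "redistrib" in action:
--             action_groups.setdefault("pressure_management", []).append(step)
--         elif "dressing" in action or "wound" in action: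
--             action_groups.setdefault("wound_care", []).append(step)
--         elif "nutrition" in action:
--             action_groups.setdefault("nutrition", []).append(step)
--         else:
--             action_groups.setdefault("general", []).append(step)
--
--     # Generate primary recommendations
--     recommendations = []
--     for category, category_steps in action_groups.items():
--         if category_steps:
--             highest_evidence = max(
--                 category_steps,
--                 key=lambda x: {"A": 3, "B": 2, "C": 1}.get(x.get("evidence_level", "C"), 0)
--             )
--             recommendations.append(highest_evidence["action"])
--
--     return recommendations[:5]  # Top 5 recommendations
-- ===== SOURCE B (Python) =====
-- def _extract_primary_recommendations(steps):
--     """Extract primary recommendations from protocol steps (single pass)."""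
--     scores = {"A": 3, "B": 2, "C": 1}
--     best = {}  # category -> (evidence score, best step), in first-encounter order
--     for step in steps:
--         low = step.get("action", "").lower()
--         if "assessment" in low:
--             cat = "assessment"
--         elif "position" in low or "redistrib" in low:
--             cat = "pressure_management"
--         elif "dressing" in low or "wound" in low:
--             cat = "wound_care"
--         elif "nutrition" in low:
--             cat = "nutrition"
--         else:
--             cat = "general"
--         score = scores.get(step.get("evidence_level", "C"), 0)
--         if cat not in best or score > best[cat][0]:
--             best[cat] = (score, step)
--     return [s["action"] for (_, s) in best.values()][:5]
-- ===== Notes on version B (the rewrite author's own statement) =====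
-- stated objective: simpler
-- what changed: Replaces the two-pass group-then-max (building per-category lists of all steps, then scanning each group with max) by a single pass that keeps only the best (evidence score, step) pair per category, overwriting on strictly greater score so the first maximal step wins exactly as with max.
import Mathlib
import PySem

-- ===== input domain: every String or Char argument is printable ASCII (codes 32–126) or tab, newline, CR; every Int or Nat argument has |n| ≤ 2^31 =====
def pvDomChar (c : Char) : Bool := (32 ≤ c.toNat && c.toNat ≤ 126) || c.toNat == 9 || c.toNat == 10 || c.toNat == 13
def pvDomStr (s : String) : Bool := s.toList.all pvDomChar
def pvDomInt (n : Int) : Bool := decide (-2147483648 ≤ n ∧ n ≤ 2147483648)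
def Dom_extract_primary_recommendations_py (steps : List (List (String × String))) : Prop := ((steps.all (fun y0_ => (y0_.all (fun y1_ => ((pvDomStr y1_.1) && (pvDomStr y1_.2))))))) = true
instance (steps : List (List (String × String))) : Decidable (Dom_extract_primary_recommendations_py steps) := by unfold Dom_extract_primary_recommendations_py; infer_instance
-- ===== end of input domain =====

-- B replaces A's two passes (group steps per category, then max per group) by one pass keeping only the
-- best (evidence score, step) pair per category; equal return values are proved (no argument is mutated).


-- ===== PORT A =====
def extract_primary_recommendations_py (steps : List (List (String × String))) : List String :=
  let action_groups : PySem.Dict String (List (List (String × String))) :=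
    steps.foldl (fun g step =>
      let action := PySem.Str.lower ((PySem.Dict.mk step).getD "action" "")
      if PySem.Str.isIn "assessment" action then
        g.modify "assessment" [] (· ++ [step])
      else if PySem.Str.isIn "position" action || PySem.Str.isIn "redistrib" action then
        g.modify "pressure_management" [] (· ++ [step])
      else if PySem.Str.isIn "dressing" action || PySem.Str.isIn "wound" action then
        g.modify "wound_care" [] (· ++ [step])
      else if PySem.Str.isIn "nutrition" action then
        g.modify "nutrition" [] (· ++ [step])
      else
        g.modify "general" [] (· ++ [step])) PySem.Dict.empty
  let recommendations : List String :=
    action_groups.items.foldl (fun recs p =>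
      if p.2 ≠ [] then
        match PySem.List.max? p.2 (fun x =>
            (PySem.Dict.mk [("A", (3 : Int)), ("B", 2), ("C", 1)]).getD
              ((PySem.Dict.mk x).getD "evidence_level" "C") 0) with
        | some highest_evidence =>
            recs ++ [(PySem.Dict.mk highest_evidence).getD "action" ""]
        | none => recs
      else recs) []
  PySem.List.slice recommendations none (some 5)

-- ===== PORT B =====
def pvEvidenceScores : PySem.Dict String Int := PySem.Dict.mk [("A", 3), ("B", 2), ("C", 1)]

def extract_primary_recommendations_py_alt (steps : List (List (String × String))) : List String :=
  let best : PySem.Dict String (Int × List (String × String)) :=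
    steps.foldl (fun b step =>
      let low := PySem.Str.lower ((PySem.Dict.mk step).getD "action" "")
      let cat : String :=
        if PySem.Str.isIn "assessment" low then "assessment"
        else if PySem.Str.isIn "position" low || PySem.Str.isIn "redistrib" low then "pressure_management"
        else if PySem.Str.isIn "dressing" low || PySem.Str.isIn "wound" low then "wound_care"
        else if PySem.Str.isIn "nutrition" low then "nutrition"
        else "general"
      let score := pvEvidenceScores.getD ((PySem.Dict.mk step).getD "evidence_level" "C") 0
      if !b.contains cat || score > (b.getD cat (0, [])).1 then b.insert cat (score, step) else b)
      PySem.Dict.empty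
  -- s["action"] for each stored best step: the key is present under Pre_ (Python raises KeyError otherwise)
  PySem.List.slice (best.values.map (fun pr => (PySem.Dict.mk pr.2).getD "action" "")) none (some 5)

-- ===== PRECONDITION & SPEC =====
-- per-step values (used by Pre_ and the proofs): the action string, its category, its evidence score
def pvAct (s : List (String × String)) : String := (PySem.Dict.mk s).getD "action" ""

def pvCat (s : List (String × String)) : String :=
  let low := PySem.Str.lower (pvAct s)
  if PySem.Str.isIn "assessment" low then "assessment"
  else if PySem.Str.isIn "position" low || PySem.Str.isIn "redistrib" low then "pressure_management"
  else if PySem.Str.isIn "dressing" low || PySem.Str.isIn "wound" low then "wound_care"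
  else if PySem.Str.isIn "nutrition" low then "nutrition"
  else "general"

def pvScore (s : List (String × String)) : Int :=
  (PySem.Dict.mk [("A", (3 : Int)), ("B", 2), ("C", 1)]).getD ((PySem.Dict.mk s).getD "evidence_level" "C") 0

-- the steps that fall into the "general" category (the only category a step without "action" can reach)
def pvGen (steps : List (List (String × String))) : List (List (String × String)) :=
  steps.filter (fun s => pvCat s == "general")

-- Pre_ excludes exactly the inputs on which Python A raises KeyError: those where the step max selects
-- for the "general" category (first maximal evidence score) lacks the "action" key.
def Pre_extract_primary_recommendations_py (steps : List (List (String × String))) : Prop :=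
  ∀ i : Fin (pvGen steps).length,
    (∀ j : Fin (pvGen steps).length,
        (j.1 < i.1 → pvScore (pvGen steps)[j] < pvScore (pvGen steps)[i]) ∧
        (i.1 < j.1 → pvScore (pvGen steps)[j] ≤ pvScore (pvGen steps)[i])) →
    (PySem.Dict.mk (pvGen steps)[i]).contains "action" = true
instance (steps : List (List (String × String))) : Decidable (Pre_extract_primary_recommendations_py steps) := by
  unfold Pre_extract_primary_recommendations_py; infer_instance

def pvWitness_extract_primary_recommendations_py : (List (List (String × String))) :=
  [[("action", "Skin assessment"), ("evidence_level", "A")], [("action", "Reposition every 2 hours")]]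

def Spec_extract_primary_recommendations_py (steps : List (List (String × String))) (out : List String) : Prop := out = extract_primary_recommendations_py_alt steps
instance (steps : List (List (String × String))) (out : List String) : Decidable (Spec_extract_primary_recommendations_py steps out) := by unfold Spec_extract_primary_recommendations_py; infer_instance

-- ===== CLAIM (what is proved, stated in full; the proofs are below) =====
def Claim_equal_extract_primary_recommendations_py : Prop := ∀ (steps : List (List (String × String))), Dom_extract_primary_recommendations_py steps → Pre_extract_primary_recommendations_py steps → Spec_extract_primary_recommendations_py steps (extract_primary_recommendations_py steps)

-- ===== LEMMAS AND PROOFS =====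

-- proof-side helpers: the per-step values both loops compute, A's group dict vs B's best dict
def pvUpd (acc : Int × List (String × String)) (s : List (String × String)) : Int × List (String × String) :=
  if pvScore s > acc.1 then (pvScore s, s) else acc
def pvBestL : List (List (String × String)) → Int × List (String × String)
  | [] => (0, [])
  | s :: t => t.foldl pvUpd (pvScore s, s)
def pvGroupStep (g : PySem.Dict String (List (List (String × String)))) (step : List (String × String)) :
    PySem.Dict String (List (List (String × String))) :=
  g.modify (pvCat step) [] (· ++ [step])
def pvBestStep (b : PySem.Dict String (Int × List (String × String))) (step : List (String × String)) :
    PySem.Dict String (Int × List (String × String)) :=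
  if !b.contains (pvCat step) || pvScore step > (b.getD (pvCat step) (0, [])).1 then
    b.insert (pvCat step) (pvScore step, step)
  else b
def pvF (p : String × List (List (String × String))) : String × (Int × List (String × String)) := (p.1, pvBestL p.2)
def pvInv (g : PySem.Dict String (List (List (String × String)))) (b : PySem.Dict String (Int × List (String × String))) : Prop :=
  b.items = g.items.map pvF ∧ (∀ p ∈ g.items, p.2 ≠ []) ∧ g.keys.Nodup

theorem pvBestL_append (l : List (List (String × String))) (s : List (String × String)) (h : l ≠ []) :
    pvBestL (l ++ [s]) = pvUpd (pvBestL l) s := by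
  cases l with
  | nil => exact absurd rfl h
  | cons x t => simp [pvBestL, List.foldl_append]

theorem pvInv_step (g : PySem.Dict String (List (List (String × String)))) (b : PySem.Dict String (Int × List (String × String)))
    (step : List (String × String)) (h : pvInv g b) : pvInv (pvGroupStep g step) (pvBestStep b step) := by
  obtain ⟨hb, hne, hnd⟩ := h
  set c := pvCat step with hc
  have hcont : b.contains c = g.contains c := by
    simp [PySem.Dict.contains, hb, List.any_map, pvF, Function.comp_def]
  by_cases hgc : g.contains c = true
  · -- category already present
    obtain ⟨old, hold⟩ : ∃ old, g.get? c = some old := by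
      have h1 := PySem.Dict.contains_eq_isSome_get? g c
      rw [hgc] at h1; exact Option.isSome_iff_exists.mp h1.symm
    have hgetD : g.getD c [] = old := PySem.Dict.getD_of_get?_eq_some g [] hold
    have hmemold : (c, old) ∈ g.items := PySem.Dict.mem_items_of_get?_eq_some g hold
    have holdne : old ≠ [] := hne _ hmemold
    have hbget : b.get? c = some (pvBestL old) := by
      have hfind : g.items.find? (fun p => p.1 == c) = some (c, old) := by
        have h1 := hold
        unfold PySem.Dict.get? at h1
        obtain ⟨q, hq1, hq2⟩ := Option.map_eq_some_iff.mp h1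
        have hqc : q.1 = c := by
          have := List.find?_some hq1
          simpa using this
        have hq : q = (c, old) := by cases q; simp_all
        rwa [hq] at hq1
      unfold PySem.Dict.get?
      rw [hb, List.find?_map]
      have hcomp : (fun p : String × (Int × List (String × String)) => p.1 == c) ∘ pvF = fun p => p.1 == c := by
        funext p; simp [pvF]
      rw [hcomp, hfind]
      rfl
    have hbgetD : b.getD c (0, []) = pvBestL old := PySem.Dict.getD_of_get?_eq_some b _ hbget
    have hbc : b.contains c = true := hcont.trans hgc
    have hval : ∀ p ∈ g.items, (p.1 == c) = true → p.2 = old := by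
      intro p hp hpc
      have h2 : g.get? p.1 = some p.2 := PySem.Dict.get?_of_mem_items g (by cases p; exact hp) hnd
      rw [eq_of_beq hpc, hold] at h2
      exact (Option.some_injective _ h2).symm
    have hGitems : (pvGroupStep g step).items
        = g.items.map (fun p => if p.1 == c then (c, old ++ [step]) else p) := by
      show (g.insert c (g.getD c [] ++ [step])).items = _
      rw [PySem.Dict.items_insert_of_contains g _ hgc, hgetD]
    refine ⟨?_, ?_, ?_⟩
    · -- items relation
      by_cases hgt : pvScore step > (pvBestL old).1
      · have hBitems : (pvBestStep b step).items
            = b.items.map (fun q => if q.1 == c then (c, (pvScore step, step)) else q) := by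
          unfold pvBestStep
          rw [← hc, hbc, hbgetD]
          simp only [hgt, Bool.not_true, Bool.false_or]
          exact PySem.Dict.items_insert_of_contains b _ hbc
        rw [hBitems, hGitems, hb, List.map_map, List.map_map]
        refine List.map_congr_left ?_
        intro p hp
        by_cases hpc : (p.1 == c) = true
        · have hp2 : p.2 = old := hval p hp hpc
          have he : p.1 = c := eq_of_beq hpc
          simp [pvF, he, hp2, pvBestL_append old step holdne, pvUpd, hgt]
        · have he : ¬ p.1 = c := fun e => hpc (by simp [e])
          simp [pvF, he]
      · have hBitems : (pvBestStep b step).items = b.items := by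
          unfold pvBestStep
          rw [← hc, hbc, hbgetD]
          simp [hgt]
        rw [hBitems, hGitems, hb, List.map_map]
        refine List.map_congr_left ?_
        intro p hp
        by_cases hpc : (p.1 == c) = true
        · have hp2 : p.2 = old := hval p hp hpc
          have he : p.1 = c := eq_of_beq hpc
          simp [pvF, he, hp2, pvBestL_append old step holdne, pvUpd, hgt]
        · have he : ¬ p.1 = c := fun e => hpc (by simp [e])
          simp [pvF, he]
    · intro p hp
      rw [hGitems] at hp
      obtain ⟨q, hq, hqe⟩ := List.mem_map.mp hp
      by_cases hpc : (q.1 == c) = true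
      · rw [if_pos hpc] at hqe; subst hqe; simp [holdne]
      · rw [if_neg hpc] at hqe; subst hqe; exact hne q hq
    · show (g.insert c (g.getD c [] ++ [step])).keys.Nodup
      exact PySem.Dict.nodup_keys_insert g _ _ hnd
  · -- new category
    have hgc' : g.contains c = false := by simpa using hgc
    have hbc : b.contains c = false := hcont.trans hgc'
    have hgetD : g.getD c [] = [] := PySem.Dict.getD_of_not_contains g [] hgc'
    have hGitems : (pvGroupStep g step).items = g.items ++ [(c, [step])] := by
      show (g.insert c (g.getD c [] ++ [step])).items = _
      rw [PySem.Dict.items_insert_of_not_contains g _ hgc', hgetD]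
      rfl
    have hBitems : (pvBestStep b step).items = b.items ++ [(c, (pvScore step, step))] := by
      unfold pvBestStep
      rw [← hc, hbc]
      simp only [Bool.not_false, Bool.true_or, if_true]
      exact PySem.Dict.items_insert_of_not_contains b _ hbc
    refine ⟨?_, ?_, ?_⟩
    · rw [hBitems, hGitems, hb, List.map_append]
      rfl
    · intro p hp
      rw [hGitems] at hp
      rcases List.mem_append.mp hp with h1 | h1
      · exact hne p h1
      · simp at h1; subst h1; simp
    · show (g.insert c (g.getD c [] ++ [step])).keys.Nodup
      exact PySem.Dict.nodup_keys_insert g _ _ hnd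

theorem pvInv_foldl (steps : List (List (String × String)))
    (g : PySem.Dict String (List (List (String × String)))) (b : PySem.Dict String (Int × List (String × String)))
    (h : pvInv g b) : pvInv (steps.foldl pvGroupStep g) (steps.foldl pvBestStep b) := by
  induction steps generalizing g b with
  | nil => exact h
  | cons s t ih => exact ih _ _ (pvInv_step g b s h)

theorem pvMax_cons_cons (s y : List (String × String)) (t : List (List (String × String))) :
    PySem.List.max? (s :: y :: t) pvScore
      = PySem.List.max? ((if pvScore s < pvScore y then y else s) :: t) pvScore := by
  by_cases h : pvScore s < pvScore y <;> simp [PySem.List.max?, h]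

theorem pvMax_foldl (t : List (List (String × String))) (s : List (String × String)) :
    ∃ M, PySem.List.max? (s :: t) pvScore = some M ∧
        (pvScore M, M) = t.foldl pvUpd (pvScore s, s) := by
  induction t generalizing s with
  | nil => exact ⟨s, rfl, rfl⟩
  | cons y t ih =>
    rw [pvMax_cons_cons]
    by_cases h : pvScore s < pvScore y
    · obtain ⟨M, h1, h2⟩ := ih y
      exact ⟨M, by simpa [h] using h1, by simpa [pvUpd, h] using h2⟩
    · obtain ⟨M, h1, h2⟩ := ih s
      exact ⟨M, by simpa [h] using h1, by simpa [pvUpd, h] using h2⟩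

theorem pv_main (steps : List (List (String × String))) :
    extract_primary_recommendations_py steps = extract_primary_recommendations_py_alt steps := by
  have hA : (fun (g : PySem.Dict String (List (List (String × String)))) step =>
      let action := PySem.Str.lower ((PySem.Dict.mk step).getD "action" "")
      if PySem.Str.isIn "assessment" action then
        g.modify "assessment" [] (· ++ [step])
      else if PySem.Str.isIn "position" action || PySem.Str.isIn "redistrib" action then
        g.modify "pressure_management" [] (· ++ [step])
      else if PySem.Str.isIn "dressing" action || PySem.Str.isIn "wound" action then
        g.modify "wound_care" [] (· ++ [step])
      else if PySem.Str.isIn "nutrition" action then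
        g.modify "nutrition" [] (· ++ [step])
      else
        g.modify "general" [] (· ++ [step])) = pvGroupStep := by
    funext g step
    simp only [pvGroupStep, pvCat, pvAct]
    split_ifs <;> rfl
  have hB : (fun (b : PySem.Dict String (Int × List (String × String))) step =>
      let low := PySem.Str.lower ((PySem.Dict.mk step).getD "action" "")
      let cat : String :=
        if PySem.Str.isIn "assessment" low then "assessment"
        else if PySem.Str.isIn "position" low || PySem.Str.isIn "redistrib" low then "pressure_management"
        else if PySem.Str.isIn "dressing" low || PySem.Str.isIn "wound" low then "wound_care"
        else if PySem.Str.isIn "nutrition" low then "nutrition"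
        else "general"
      let score := pvEvidenceScores.getD ((PySem.Dict.mk step).getD "evidence_level" "C") 0
      if !b.contains cat || score > (b.getD cat (0, [])).1 then b.insert cat (score, step) else b)
      = pvBestStep := rfl
  unfold extract_primary_recommendations_py extract_primary_recommendations_py_alt
  rw [hA, hB]
  obtain ⟨hb, hne, hnd⟩ := pvInv_foldl steps PySem.Dict.empty PySem.Dict.empty ⟨rfl, by intro p hp; simp [PySem.Dict.empty] at hp, by simp [PySem.Dict.empty, PySem.Dict.keys]⟩
  set G := steps.foldl pvGroupStep PySem.Dict.empty with hG
  set B := steps.foldl pvBestStep PySem.Dict.empty with hBdef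
  have hitem : ∀ (recs : List String), ∀ p ∈ G.items,
      (if p.2 ≠ [] then
        match PySem.List.max? p.2 (fun x =>
            (PySem.Dict.mk [("A", (3 : Int)), ("B", 2), ("C", 1)]).getD
              ((PySem.Dict.mk x).getD "evidence_level" "C") 0) with
        | some highest_evidence => recs ++ [(PySem.Dict.mk highest_evidence).getD "action" ""]
        | none => recs
      else recs) = recs ++ [(PySem.Dict.mk (pvBestL p.2).2).getD "action" ""] := by
    intro recs p hp
    have hpne := hne p hp
    rw [if_pos hpne]
    obtain ⟨s, t, hst⟩ : ∃ s t, p.2 = s :: t := by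
      cases hpe : p.2 with
      | nil => exact absurd hpe hpne
      | cons s t => exact ⟨s, t, rfl⟩
    rw [hst]
    obtain ⟨M, hmax, h2⟩ := pvMax_foldl t s
    rw [show (fun x => (PySem.Dict.mk [("A", (3 : Int)), ("B", 2), ("C", 1)]).getD
          ((PySem.Dict.mk x).getD "evidence_level" "C") 0) = pvScore from rfl, hmax]
    show recs ++ [(PySem.Dict.mk M).getD "action" ""]
        = recs ++ [(PySem.Dict.mk (pvBestL (s :: t)).2).getD "action" ""]
    have h3 : (pvBestL (s :: t)).2 = M := by rw [pvBestL, ← h2]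
    rw [h3]
  dsimp only
  rw [PySem.List.foldl_congr_mem _ _
        (fun recs p => recs ++ [(PySem.Dict.mk (pvBestL p.2).2).getD "action" ""]) _ hitem,
      PySem.List.foldl_append_singleton_eq_map]
  have : B.values.map (fun pr => (PySem.Dict.mk pr.2).getD "action" "")
      = G.items.map (fun p => (PySem.Dict.mk (pvBestL p.2).2).getD "action" "") := by
    simp [PySem.Dict.values, hb, List.map_map, pvF, Function.comp_def]
  rw [this]
  rfl

-- ===== VERDICT (by name: the statement is the Claim_ definition above) =====
theorem extract_primary_recommendations_py_spec : Claim_equal_extract_primary_recommendations_py := by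
  intro steps _dom _pre
  exact pv_main steps
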